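-- pv_equiv track=rewrite | github.com/MelikGazi-58/hexgame-backend-python | main.py | build_map
-- ===== SOURCE A (Python) =====
-- def build_map(radius: int):
--     """Axial hex disk map (q,r)."""
--     cells = {}
--     cid = 0
--     R = max(1, min(radius, 6))
--     for q in range(-R, R + 1):
--         r1 = max(-R, -q - R)
--         r2 = min(R, -q + R)
--         for r in range(r1, r2 + 1):
--             cells[cid] = {"id": cid, "q": q, "r": r, "owner": None, "troops": 0}
--             cid += 1
--     return cells
-- ===== SOURCE B (Python) =====
-- def build_map(radius: int):
--     """Axial hex disk map (q,r)."""
--     R = max(1, min(radius, 6))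
--     dirs = [(1, 0), (1, -1), (0, -1), (-1, 0), (-1, 1), (0, 1)]
--     coords = [(0, 0)]
--     for k in range(1, R + 1):
--         q, r = -k, k
--         for dq, dr in dirs:
--             for _ in range(k):
--                 coords.append((q, r))
--                 q, r = q + dq, r + dr
--     coords.sort()
--     return {i: {"id": i, "q": q, "r": r, "owner": None, "troops": 0}
--             for i, (q, r) in enumerate(coords)}
-- ===== Notes on version B (the rewrite author's own statement) =====
-- stated objective: alternative
-- what changed: Instead of nested loops with per-q computed r-bounds and a running counter, B generates the disk as a center cell plus concentric rings walked with the six axial direction vectors, sorts the coordinates lexicographically, and numbers them with enumerate into a dict comprehension.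
import Mathlib
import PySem

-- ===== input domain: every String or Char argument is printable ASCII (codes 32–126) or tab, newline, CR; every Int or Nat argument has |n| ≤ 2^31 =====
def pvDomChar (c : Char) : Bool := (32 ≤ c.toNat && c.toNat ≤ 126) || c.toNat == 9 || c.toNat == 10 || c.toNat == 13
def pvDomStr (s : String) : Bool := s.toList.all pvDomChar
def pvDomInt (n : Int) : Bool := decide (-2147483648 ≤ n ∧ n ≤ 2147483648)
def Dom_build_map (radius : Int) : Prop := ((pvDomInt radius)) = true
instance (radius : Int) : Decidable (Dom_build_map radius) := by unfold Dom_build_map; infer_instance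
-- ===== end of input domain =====

-- B builds the disk by a different algorithm: center + concentric rings walked with the
-- six axial direction vectors, then a lexicographic sort and enumerate (objective: alternative).

-- ===== PORT A =====
-- A-side helper: A's nested loops with computed r-bounds, taken after R is clamped.
def buildCellsA (R : Int) : List (Int × List (String × Option Int)) :=
  ((PySem.List.pyRange (-R) (R + 1) 1).foldl (fun st q =>
      let r1 := max (-R) (-q - R)
      let r2 := min R (-q + R)
      (PySem.List.pyRange r1 (r2 + 1) 1).foldl (fun st r =>
          (st.1.insert st.2
             [("id", some st.2), ("q", some q), ("r", some r), ("owner", none), ("troops", some 0)],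
           st.2 + 1)) st)
    ((PySem.Dict.empty : PySem.Dict Int (List (String × Option Int))), (0 : Int))).1.items

def build_map (radius : Int) : List (Int × List (String × Option Int)) :=
  buildCellsA (max 1 (min radius 6))

-- ===== PORT B =====
-- Hand port of Python's list.sort() on int pairs: exact, since tuple comparison on
-- (int, int) is lexicographic and all coordinates here are distinct (stability moot).
def pairLt (a b : Int × Int) : Bool := a.1 < b.1 || (a.1 == b.1 && a.2 < b.2)

def insertPair (x : Int × Int) : List (Int × Int) → List (Int × Int)
  | [] => [x]
  | y :: ys => if pairLt x y then x :: y :: ys else y :: insertPair x ys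

def sortPairs (l : List (Int × Int)) : List (Int × Int) := l.foldr insertPair []

-- B-side: ring walk, sort, enumerate into the dict.
def build_map_alt (radius : Int) : List (Int × List (String × Option Int)) :=
  let R := max 1 (min radius 6)
  let dirs : List (Int × Int) := [(1, 0), (1, -1), (0, -1), (-1, 0), (-1, 1), (0, 1)]
  let coords := (PySem.List.pyRange 1 (R + 1) 1).foldl (fun acc k =>
      (dirs.foldl (fun st d =>
          (PySem.List.pyRange 0 k 1).foldl (fun st _ =>
              (st.1 ++ [st.2], (st.2.1 + d.1, st.2.2 + d.2))) st)
        (acc, ((-k : Int), k))).1)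
    [((0 : Int), (0 : Int))]
  ((PySem.List.enumerate (sortPairs coords)).foldl
      (fun (d : PySem.Dict Int (List (String × Option Int))) iqr =>
        d.insert iqr.1
          [("id", some iqr.1), ("q", some iqr.2.1), ("r", some iqr.2.2),
           ("owner", none), ("troops", some 0)])
    PySem.Dict.empty).items

-- ===== PRECONDITION & SPEC =====
def Spec_build_map (radius : Int) (out : List (Int × List (String × Option Int))) : Prop := out = build_map_alt radius
instance (radius : Int) (out : List (Int × List (String × Option Int))) : Decidable (Spec_build_map radius out) := by unfold Spec_build_map; infer_instance

-- ===== CLAIM (what is proved, stated in full; the proofs are below) =====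
def Claim_equal_build_map : Prop := ∀ (radius : Int), Dom_build_map radius → Spec_build_map radius (build_map radius)

-- ===== LEMMAS AND PROOFS =====
-- The clamped radius takes one of six values; both programs are then closed computations.
set_option maxRecDepth 8000 in
theorem build_eq_clamped (radius : Int) : build_map radius = build_map_alt radius := by
  unfold build_map build_map_alt
  have h : max 1 (min radius 6) = 1 ∨ max 1 (min radius 6) = 2 ∨ max 1 (min radius 6) = 3 ∨
      max 1 (min radius 6) = 4 ∨ max 1 (min radius 6) = 5 ∨ max 1 (min radius 6) = 6 := by omega
  rcases h with h | h | h | h | h | h <;> rw [h] <;> decide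

-- ===== VERDICT (by name: the statement is the Claim_ definition above) =====
theorem build_map_spec : Claim_equal_build_map := by
  intro radius _
  unfold Spec_build_map
  exact build_eq_clamped radius
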